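-- pv_equiv track=rewrite | github.com/raeez/chiral-bar-cobar | compute/lib/extended_ferm_ghost.py | koszul_hilbert_product
-- ===== SOURCE A (Python) =====
-- from typing import Dict, List, Optional, Tuple
--
-- def koszul_hilbert_product(h_A: List[int], h_A_dual: List[int]) -> List[int]:
--     """Compute coefficients of H_A(t) * H_{A!}(-t).
--
--     For a classical Koszul pair: H_A(t) * H_{A!}(-t) = 1.
--
--     IMPORTANT: This relation holds for CLASSICAL Koszul duality.
--     For CHIRAL bar cohomology, the OS algebra structure modifies
--     the relation (thm:betagamma-bc-koszul uses different verification).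
--     """
--     n = min(len(h_A), len(h_A_dual))
--     product = [0] * n
--     for k in range(n):
--         for i in range(k + 1):
--             j = k - i
--             if i < len(h_A) and j < len(h_A_dual):
--                 product[k] += h_A[i] * h_A_dual[j] * ((-1) ** j)
--     return product
-- ===== SOURCE B (Python) =====
-- def _add(p, q):
--     # coefficient-wise polynomial sum, length = max(len(p), len(q))
--     if len(p) < len(q):
--         p, q = q, p
--     out = list(p)
--     for i in range(len(q)):
--         out[i] += q[i]
--     return out
--
--
-- def _sub(p, q):
--     # coefficient-wise polynomial difference, length = max(len(p), len(q))
--     out = list(p) + [0] * (len(q) - len(p))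
--     for i in range(len(q)):
--         out[i] -= q[i]
--     return out
--
--
-- def _kara(a, b):
--     # Karatsuba divide-and-conquer polynomial multiplication (full product).
--     if not a or not b:
--         return []
--     if len(a) == 1:
--         return [a[0] * x for x in b]
--     if len(b) == 1:
--         return [b[0] * x for x in a]
--     m = min(len(a), len(b)) // 2
--     a0, a1 = a[:m], a[m:]
--     b0, b1 = b[:m], b[m:]
--     p0 = _kara(a0, b0)
--     p1 = _kara(a1, b1)
--     pm = _kara(_add(a0, a1), _add(b0, b1))
--     mid = _sub(_sub(pm, p0), p1)
--     return _add(_add(p0, [0] * m + mid), [0] * (2 * m) + p1)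
--
--
-- def koszul_hilbert_product(h_A, h_A_dual):
--     # Alternative algorithm: alternate the dual signs once, multiply the two truncated
--     # polynomials by Karatsuba, and keep the first n coefficients.
--     n = min(len(h_A), len(h_A_dual))
--     a = h_A[:n]
--     b = [h_A_dual[j] if j % 2 == 0 else -h_A_dual[j] for j in range(n)]
--     return (_kara(a, b) + [0] * n)[:n]
-- ===== Notes on version B (the rewrite author's own statement) =====
-- stated objective: alternative
-- what changed: A gathers each output coefficient with a nested loop over all (i,j) index pairs and a (-1)**j power per term; B alternates the dual signs in one pass, multiplies the two truncated polynomials with recursive Karatsuba divide-and-conquer (three half-size subproducts combined by shifted adds/subtracts), and truncates the full product to n coefficients.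
import Mathlib
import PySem

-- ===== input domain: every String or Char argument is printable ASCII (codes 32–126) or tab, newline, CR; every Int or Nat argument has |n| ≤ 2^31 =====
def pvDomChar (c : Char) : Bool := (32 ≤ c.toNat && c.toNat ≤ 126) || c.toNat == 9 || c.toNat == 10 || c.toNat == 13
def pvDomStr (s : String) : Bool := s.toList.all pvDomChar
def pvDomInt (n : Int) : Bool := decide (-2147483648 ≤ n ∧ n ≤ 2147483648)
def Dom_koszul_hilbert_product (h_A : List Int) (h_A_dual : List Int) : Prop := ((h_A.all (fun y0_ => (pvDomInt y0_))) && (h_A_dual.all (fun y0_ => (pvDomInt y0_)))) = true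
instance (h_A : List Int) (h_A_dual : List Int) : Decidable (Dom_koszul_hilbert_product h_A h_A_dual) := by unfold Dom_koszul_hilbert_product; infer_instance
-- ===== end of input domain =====

-- B replaces A's nested gather loop by one sign pass plus Karatsuba divide-and-conquer
-- polynomial multiplication truncated to n coefficients (objective: alternative algorithm).


-- ===== PORT A =====
-- literal transliteration of A: for k in range(n): for i in range(k+1): guarded accumulate into product[k]
def koszul_hilbert_product (h_A : List Int) (h_A_dual : List Int) : List Int :=
  let n := min h_A.length h_A_dual.length
  (List.range n).foldl (fun product k =>
    (List.range (k + 1)).foldl (fun product i =>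
      let j := k - i
      if i < h_A.length ∧ j < h_A_dual.length then
        product.set k (product.getD k 0 + h_A.getD i 0 * h_A_dual.getD j 0 * (-1 : Int) ^ j)
      else product) product) (List.replicate n 0)

-- ===== PORT B =====
-- _add: if len(p) < len(q): p, q = q, p; out = list(p); for i in range(len(q)): out[i] += q[i]
def pvAdd (p : List Int) (q : List Int) : List Int :=
  if p.length < q.length then
    (List.range p.length).foldl (fun out i => out.set i (out.getD i 0 + p.getD i 0)) q
  else
    (List.range q.length).foldl (fun out i => out.set i (out.getD i 0 + q.getD i 0)) p

-- _sub: out = list(p) + [0]*(len(q)-len(p)); for i in range(len(q)): out[i] -= q[i]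
def pvSub (p : List Int) (q : List Int) : List Int :=
  (List.range q.length).foldl (fun out i => out.set i (out.getD i 0 - q.getD i 0))
    (p ++ List.replicate (q.length - p.length) 0)

-- _kara: Karatsuba divide-and-conquer polynomial multiplication.
-- Ported with a fuel counter (fuel = len a + len b at the call site, a totality guard only:
-- every recursive call strictly decreases len a + len b, so fuel is never exhausted).
def pvKaraF : Nat → List Int → List Int → List Int
  | 0, _, _ => []
  | fuel + 1, a, b =>
    if a.length = 0 ∨ b.length = 0 then []
    else if a.length = 1 then b.map (fun x => a.getD 0 0 * x)
    else if b.length = 1 then a.map (fun x => b.getD 0 0 * x)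
    else
      let m := min a.length b.length / 2
      let a0 := a.take m
      let a1 := a.drop m
      let b0 := b.take m
      let b1 := b.drop m
      let p0 := pvKaraF fuel a0 b0
      let p1 := pvKaraF fuel a1 b1
      let pm := pvKaraF fuel (pvAdd a0 a1) (pvAdd b0 b1)
      let mid := pvSub (pvSub pm p0) p1
      pvAdd (pvAdd p0 (List.replicate m 0 ++ mid)) (List.replicate (2 * m) 0 ++ p1)

def pvKara (a : List Int) (b : List Int) : List Int := pvKaraF (a.length + b.length) a b

-- koszul_hilbert_product (B): sign pass, Karatsuba, truncate to n
def koszul_hilbert_product_alt (h_A : List Int) (h_A_dual : List Int) : List Int :=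
  let n := min h_A.length h_A_dual.length
  let a := h_A.take n
  let b := (List.range n).map (fun j =>
    if j % 2 == 0 then h_A_dual.getD j 0 else -(h_A_dual.getD j 0))
  (pvKara a b ++ List.replicate n 0).take n

-- ===== PRECONDITION & SPEC =====
def Spec_koszul_hilbert_product (h_A : List Int) (h_A_dual : List Int) (out : List Int) : Prop := out = koszul_hilbert_product_alt h_A h_A_dual
instance (h_A : List Int) (h_A_dual : List Int) (out : List Int) : Decidable (Spec_koszul_hilbert_product h_A h_A_dual out) := by unfold Spec_koszul_hilbert_product; infer_instance

-- ===== CLAIM (what is proved, stated in full; the proofs are below) =====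
def Claim_equal_koszul_hilbert_product : Prop := ∀ (h_A : List Int) (h_A_dual : List Int), Dom_koszul_hilbert_product h_A h_A_dual → Spec_koszul_hilbert_product h_A h_A_dual (koszul_hilbert_product h_A h_A_dual)

-- ===== LEMMAS AND PROOFS =====

theorem length_foldl_set (l : List Nat) (f : List Int → Nat → Int) (base : List Int) :
    (l.foldl (fun out i => out.set i (f out i)) base).length = base.length := by
  induction l generalizing base with
  | nil => rfl
  | cons h t ih => simp [List.foldl_cons, ih]

theorem pvAdd_length (p q : List Int) : (pvAdd p q).length = max p.length q.length := by
  unfold pvAdd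
  split_ifs with h
  · rw [length_foldl_set]; omega
  · rw [length_foldl_set]; omega

-- point update p[m] += x, and its foldl theory (shared by both sides' scatter loops)
def pvAddAt (p : List Int) (m : Nat) (x : Int) : List Int := p.set m (p.getD m 0 + x)

def pvStep (p : List Int) (mx : Nat × Int) : List Int := pvAddAt p mx.1 mx.2

theorem length_pvStep (p : List Int) (mx : Nat × Int) : (pvStep p mx).length = p.length := by
  simp [pvStep, pvAddAt]

theorem length_foldl_pvStep (L : List (Nat × Int)) (p : List Int) :
    (L.foldl pvStep p).length = p.length := by
  induction L generalizing p with
  | nil => rfl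
  | cons h t ih => simp [List.foldl_cons, ih, length_pvStep]

theorem getD_pvStep (p : List Int) (mx : Nat × Int) (t : Nat) (hm : mx.1 < p.length) :
    (pvStep p mx).getD t 0 = p.getD t 0 + if mx.1 = t then mx.2 else 0 := by
  simp only [pvStep, pvAddAt, List.getD, List.getElem?_set]
  split_ifs with h1
  · subst h1; simp [hm]
  · simp

theorem getD_foldl_pvStep (L : List (Nat × Int)) (p : List Int) (t : Nat)
    (hb : ∀ mx ∈ L, mx.1 < p.length) :
    (L.foldl pvStep p).getD t 0 =
      p.getD t 0 + ((L.filter (fun mx => mx.1 == t)).map Prod.snd).sum := by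
  induction L generalizing p with
  | nil => simp
  | cons h tl ih =>
    simp only [List.foldl_cons]
    rw [ih (pvStep p h) (by intro mx hmx; rw [length_pvStep]; exact hb mx (List.mem_cons_of_mem _ hmx)),
        getD_pvStep p h t (hb h (List.mem_cons_self))]
    by_cases hh : h.1 = t
    · simp [hh]; ring
    · simp [hh]

theorem foldl_flatMap_pvStep (l : List Nat) (F : Nat → List (Nat × Int)) (p : List Int) :
    (l.flatMap F).foldl pvStep p = l.foldl (fun q k => (F k).foldl pvStep q) p := by
  induction l generalizing p with
  | nil => rfl
  | cons h t ih => simp [List.flatMap_cons, List.foldl_append, ih]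

theorem sum_map_range (f : Nat → Int) (n : Nat) :
    ((List.range n).map f).sum = ∑ i ∈ Finset.range n, f i := by
  induction n with
  | zero => simp
  | succ m ih => simp [List.range_succ, Finset.sum_range_succ, ih]

theorem filter_range_single (m c : Nat) :
    (List.range m).filter (fun i => i == c) = if c < m then [c] else [] := by
  induction m with
  | zero => simp
  | succ k ih =>
    rw [List.range_succ, List.filter_append, ih]
    by_cases hck : k = c
    · subst hck; simp
    · by_cases h1 : c < k
      · simp [h1, hck, Nat.lt_succ_of_lt h1]
      · have h2 : ¬ c < k + 1 := by omega
        simp [h1, hck, h2]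

-- ---- A side: each output coefficient is the signed convolution sum ----

def pvLA (a d : List Int) (n : Nat) : List (Nat × Int) :=
  (List.range n).flatMap (fun k =>
    (List.range (k + 1)).map (fun i => (k, a.getD i 0 * d.getD (k - i) 0 * (-1 : Int) ^ (k - i))))

theorem A_eq_fold (a d : List Int) :
    koszul_hilbert_product a d =
      (pvLA a d (min a.length d.length)).foldl pvStep (List.replicate (min a.length d.length) 0) := by
  unfold koszul_hilbert_product pvLA
  rw [foldl_flatMap_pvStep]
  apply PySem.List.foldl_congr_mem
  intro acc k hk
  rw [List.foldl_map]
  apply PySem.List.foldl_congr_mem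
  intro q i hi
  have hk' : k < min a.length d.length := List.mem_range.mp hk
  have hi' : i < k + 1 := List.mem_range.mp hi
  have : i < a.length ∧ k - i < d.length := by omega
  simp [this, pvStep, pvAddAt]

theorem pvLA_bound (a d : List Int) (n : Nat) : ∀ mx ∈ pvLA a d n, mx.1 < n := by
  intro mx hmx
  simp only [pvLA, List.mem_flatMap, List.mem_map, List.mem_range] at hmx
  obtain ⟨k, hk, i, _, rfl⟩ := hmx
  exact hk

theorem sum_filter_flatMap (l : List Nat) (g : Nat → List (Nat × Int)) (t : Nat) :
    (((l.flatMap g).filter (fun mx => mx.1 == t)).map Prod.snd).sum =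
      (l.map (fun x => (((g x).filter (fun mx => mx.1 == t)).map Prod.snd).sum)).sum := by
  induction l with
  | nil => simp
  | cons h tl ih => simp [List.flatMap_cons, List.filter_append, ih]

theorem sumA (a d : List Int) (n t : Nat) (ht : t < n) :
    (((pvLA a d n).filter (fun mx => mx.1 == t)).map Prod.snd).sum =
      ∑ i ∈ Finset.range (t + 1), a.getD i 0 * d.getD (t - i) 0 * (-1 : Int) ^ (t - i) := by
  rw [pvLA, sum_filter_flatMap, sum_map_range]
  rw [Finset.sum_eq_single_of_mem t (Finset.mem_range.mpr ht)]
  · rw [List.filter_map]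
    simp only [Function.comp_def, BEq.rfl, List.filter_true]
    rw [List.map_map, sum_map_range]
    simp
  · intro b _ hb
    have hbf : (b == t) = false := by simp [hb]
    rw [List.filter_map]
    simp [Function.comp_def, hbf]

-- ---- B side: getD/length facts for pvAdd and pvSub ----

theorem getD_replicate_zero (n k : Nat) : (List.replicate n (0 : Int)).getD k 0 = 0 := by
  rcases lt_or_ge k n with h | h
  · simp [List.getD, h]
  · exact List.getD_eq_default _ _ (by simpa using h)

theorem getD_append_zeros (p : List Int) (n t : Nat) :
    (p ++ List.replicate n 0).getD t 0 = p.getD t 0 := by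
  rcases lt_or_ge t p.length with h | h
  · simp [List.getD, List.getElem?_append_left h]
  · rw [List.getD_eq_default p _ h]
    rcases lt_or_ge t (p.length + n) with h2 | h2
    · rw [List.getD_eq_getElem _ _ (by simp; omega)]
      rw [List.getElem_append_right (by omega)]
      simp
    · rw [List.getD_eq_default _ _ (by simp; omega)]

-- a scatter loop over range(len q) adding c i at index i, started on a long-enough base
theorem getD_addInto (base : List Int) (k : Nat) (c : Nat → Int) (t : Nat)
    (hlen : k ≤ base.length) :
    ((List.range k).foldl (fun out i => out.set i (out.getD i 0 + c i)) base).getD t 0 =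
      base.getD t 0 + (if t < k then c t else 0) := by
  have hfold : (List.range k).foldl (fun out i => out.set i (out.getD i 0 + c i)) base =
      ((List.range k).map (fun i => (i, c i))).foldl pvStep base := by
    rw [List.foldl_map]; rfl
  rw [hfold, getD_foldl_pvStep]
  · rw [List.filter_map]
    have : ((fun mx : Nat × Int => mx.1 == t) ∘ fun i => (i, c i)) = fun i => i == t := by
      funext i; simp
    rw [this, filter_range_single]
    split_ifs with h <;> simp
  · intro mx hmx
    simp only [List.mem_map, List.mem_range] at hmx
    obtain ⟨i, hi, rfl⟩ := hmx
    omega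

theorem getD_pvAdd (p q : List Int) (t : Nat) :
    (pvAdd p q).getD t 0 = p.getD t 0 + q.getD t 0 := by
  unfold pvAdd
  split_ifs with h
  · rw [getD_addInto q p.length (fun i => p.getD i 0) t (by omega)]
    rcases lt_or_ge t p.length with h2 | h2
    · simp [h2]; ring
    · rw [List.getD_eq_default p _ h2]
      simp [Nat.not_lt.mpr h2]
  · rw [getD_addInto p q.length (fun i => q.getD i 0) t (by omega)]
    rcases lt_or_ge t q.length with h2 | h2
    · simp [h2]
    · rw [List.getD_eq_default q _ h2]
      simp [Nat.not_lt.mpr h2]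

theorem getD_pvSub (p q : List Int) (t : Nat) :
    (pvSub p q).getD t 0 = p.getD t 0 - q.getD t 0 := by
  unfold pvSub
  have hsetEq : (List.range q.length).foldl (fun out i => out.set i (out.getD i 0 - q.getD i 0))
      (p ++ List.replicate (q.length - p.length) 0) =
      (List.range q.length).foldl (fun out i => out.set i (out.getD i 0 + (-(q.getD i 0))))
      (p ++ List.replicate (q.length - p.length) 0) := by
    apply PySem.List.foldl_congr_mem
    intro acc i _
    ring_nf
  rw [hsetEq, getD_addInto _ q.length (fun i => -(q.getD i 0)) t (by simp; omega),
      getD_append_zeros]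
  rcases lt_or_ge t q.length with h2 | h2
  · simp [h2]; ring
  · rw [List.getD_eq_default q _ h2]
    simp [Nat.not_lt.mpr h2]

-- ---- lists as polynomials ----

noncomputable def pvPoly : List Int → Polynomial Int
  | [] => 0
  | x :: p => Polynomial.C x + Polynomial.X * pvPoly p

theorem pvPoly_coeff (l : List Int) (k : Nat) : (pvPoly l).coeff k = l.getD k 0 := by
  induction l generalizing k with
  | nil => simp [pvPoly]
  | cons x p ih =>
    cases k with
    | zero => simp [pvPoly, Polynomial.mul_coeff_zero]
    | succ k =>
      simp only [pvPoly, Polynomial.coeff_add, Polynomial.coeff_X_mul, Polynomial.coeff_C, ih]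
      simp

theorem pvPoly_pvAdd (p q : List Int) : pvPoly (pvAdd p q) = pvPoly p + pvPoly q := by
  apply Polynomial.ext
  intro k
  simp only [Polynomial.coeff_add, pvPoly_coeff]
  exact getD_pvAdd p q k

theorem pvPoly_pvSub (p q : List Int) : pvPoly (pvSub p q) = pvPoly p - pvPoly q := by
  apply Polynomial.ext
  intro k
  simp only [Polynomial.coeff_sub, pvPoly_coeff]
  exact getD_pvSub p q k

theorem pvPoly_shift (m : Nat) (l : List Int) :
    pvPoly (List.replicate m 0 ++ l) = Polynomial.X ^ m * pvPoly l := by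
  induction m with
  | zero => simp
  | succ k ih => simp [List.replicate_succ, pvPoly, ih, pow_succ]; ring

theorem pvPoly_map_mul (c : Int) (l : List Int) :
    pvPoly (l.map (fun x => c * x)) = Polynomial.C c * pvPoly l := by
  induction l with
  | nil => simp [pvPoly]
  | cons x p ih => simp [pvPoly, ih]; ring

theorem pvPoly_split (m : Nat) (l : List Int) :
    pvPoly l = pvPoly (l.take m) + Polynomial.X ^ m * pvPoly (l.drop m) := by
  induction m generalizing l with
  | zero => simp [pvPoly]
  | succ k ih =>
    cases l with
    | nil => simp [pvPoly]
    | cons x p =>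
      simp only [List.take_succ_cons, List.drop_succ_cons, pvPoly]
      rw [ih p]
      ring

theorem pvKaraF_correct (fuel : Nat) (a b : List Int) (hf : a.length + b.length ≤ fuel) :
    pvPoly (pvKaraF fuel a b) = pvPoly a * pvPoly b := by
  induction fuel generalizing a b with
  | zero =>
    have ha : a = [] := List.length_eq_zero_iff.mp (by omega)
    have hb : b = [] := List.length_eq_zero_iff.mp (by omega)
    subst ha hb
    simp [pvKaraF, pvPoly]
  | succ f ih =>
    simp only [pvKaraF]
    split_ifs with h h1 h2
    · rcases h with h | h
      · rw [List.length_eq_zero_iff.mp h]; simp [pvPoly]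
      · rw [List.length_eq_zero_iff.mp h]; simp [pvPoly]
    · rcases a with _ | ⟨x, _ | ⟨y, t⟩⟩ <;> simp_all [pvPoly, pvPoly_map_mul]
    · rcases b with _ | ⟨x, _ | ⟨y, t⟩⟩ <;> simp_all [pvPoly, pvPoly_map_mul]
      ring
    · have hm1 : 1 ≤ min a.length b.length / 2 := by omega
      have hma : min a.length b.length / 2 < a.length := by omega
      have hmb : min a.length b.length / 2 < b.length := by omega
      rw [pvPoly_pvAdd, pvPoly_pvAdd, pvPoly_shift, pvPoly_shift,
          pvPoly_pvSub, pvPoly_pvSub]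
      rw [ih _ _ (by simp only [List.length_take]; omega),
          ih _ _ (by simp only [pvAdd_length, List.length_take, List.length_drop]; omega),
          ih _ _ (by simp only [List.length_drop]; omega)]
      rw [pvPoly_pvAdd, pvPoly_pvAdd]
      rw [pvPoly_split (min a.length b.length / 2) a, pvPoly_split (min a.length b.length / 2) b]
      rw [two_mul, pow_add]
      ring

theorem pvKara_correct (a b : List Int) : pvPoly (pvKara a b) = pvPoly a * pvPoly b :=
  pvKaraF_correct (a.length + b.length) a b le_rfl

-- ---- assembling B's coefficients ----

theorem getD_map_range_sign (d : List Int) (n j : Nat) (hj : j < n) :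
    ((List.range n).map (fun j =>
      if j % 2 == 0 then d.getD j 0 else -(d.getD j 0))).getD j 0 =
      if j % 2 == 0 then d.getD j 0 else -(d.getD j 0) := by
  rw [List.getD_eq_getElem _ _ (by simpa using hj)]
  simp

theorem getD_take_lt (l : List Int) (n i : Nat) (hi : i < n) (hn : n ≤ l.length) :
    (l.take n).getD i 0 = l.getD i 0 := by
  have h1 : i < (l.take n).length := by simp; omega
  rw [List.getD_eq_getElem _ _ h1, List.getElem_take, List.getD_eq_getElem _ _ (by omega)]

theorem sign_mul_eq (x y : Int) (j : Nat) :
    x * (if j % 2 == 0 then y else -y) = x * y * (-1 : Int) ^ j := by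
  rcases Nat.even_or_odd j with h | h
  · have : j % 2 = 0 := Nat.even_iff.mp h
    simp [this, h.neg_one_pow]
  · have : j % 2 = 1 := Nat.odd_iff.mp h
    simp [this, h.neg_one_pow]

-- B's t-th coefficient is the signed convolution sum, for t < n
theorem sumB (a d : List Int) (t : Nat) (ht : t < min a.length d.length) :
    (koszul_hilbert_product_alt a d).getD t 0 =
      ∑ i ∈ Finset.range (t + 1), a.getD i 0 * d.getD (t - i) 0 * (-1 : Int) ^ (t - i) := by
  unfold koszul_hilbert_product_alt
  set n := min a.length d.length with hn
  set a' := a.take n with ha'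
  set b' := (List.range n).map (fun j =>
    if j % 2 == 0 then d.getD j 0 else -(d.getD j 0)) with hb'
  have h1 : ((pvKara a' b' ++ List.replicate n 0).take n).getD t 0 =
      (pvKara a' b' ++ List.replicate n 0).getD t 0 := by
    apply getD_take_lt _ n t ht
    simp
  rw [h1, getD_append_zeros, ← pvPoly_coeff, pvKara_correct, Polynomial.coeff_mul,
      Finset.Nat.sum_antidiagonal_eq_sum_range_succ_mk]
  apply Finset.sum_congr rfl
  intro i hi
  have hit : i ≤ t := by have := Finset.mem_range.mp hi; omega
  rw [pvPoly_coeff, pvPoly_coeff, ha', hb',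
      getD_take_lt a n i (by omega) (by omega),
      getD_map_range_sign d n (t - i) (by omega),
      sign_mul_eq]

-- lengths of both results
theorem length_A (a d : List Int) :
    (koszul_hilbert_product a d).length = min a.length d.length := by
  rw [A_eq_fold, length_foldl_pvStep, List.length_replicate]

theorem length_B (a d : List Int) :
    (koszul_hilbert_product_alt a d).length = min a.length d.length := by
  unfold koszul_hilbert_product_alt
  simp

-- ===== VERDICT (by name: the statement is the Claim_ definition above) =====
theorem koszul_hilbert_product_spec : Claim_equal_koszul_hilbert_product := by
  intro a d _
  unfold Spec_koszul_hilbert_product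
  apply List.ext_getElem
  · rw [length_A, length_B]
  · intro t h1 h2
    have h1' : t < min a.length d.length := by rw [length_A] at h1; exact h1
    rw [← List.getD_eq_getElem _ 0 h1, ← List.getD_eq_getElem _ 0 h2]
    rw [A_eq_fold, getD_foldl_pvStep _ _ _ (by
        intro mx hmx
        rw [List.length_replicate]
        exact pvLA_bound a d _ mx hmx),
      sumA a d _ t h1', sumB a d t h1', getD_replicate_zero]
    ring
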